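-- pv_equiv track=rewrite | github.com/teekwak/codefights | challenges/minesweeper1/Minesweeper1.py | minesweeper1
-- ===== SOURCE A (Python) =====
-- def minesweeper1(g):
-- 	s = sum([x for r in g for x in r if x != 9])
-- 	for m in sum([[(i, j) for j,c in enumerate(r) if c == 9] for i,r in enumerate(g)], []):
-- 		for a in range(m[0] - 1, m[0] + 2):
-- 			for b in range(m[1] - 1, m[1] + 2):
-- 				if 0 <= a < len(g) and 0 <= b < len(g[0]) and g[a][b] != 9:
-- 					s -= 1
--
-- 	return s == 0
-- ===== SOURCE B (Python) =====
-- def minesweeper1(g):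
--     # Cell-centric single pass: accumulate each non-mine value and subtract 1
--     # for every adjacent mine, instead of A's mine-centric subtraction pass.
--     rows = len(g)
--     total = 0
--     for i, row in enumerate(g):
--         for j, c in enumerate(row):
--             if c == 9:
--                 continue
--             total += c
--             for a in range(max(i - 1, 0), min(i + 2, rows)):
--                 for b in range(max(j - 1, 0), min(j + 2, len(g[a]))):
--                     if g[a][b] == 9:
--                         total -= 1
--     return total == 0
-- ===== Notes on version B (the rewrite author's own statement) =====
-- stated objective: alternative
-- what changed: B replaces A's two-phase mine-centric algorithm (global sum first, then a second pass over an explicitly built mine list subtracting in-range non-mine neighbours) by a single cell-centric pass that, for each non-mine cell, adds its value and subtracts 1 per adjacent mine found in its clipped neighbourhood, counting the same adjacency pairs from the other side.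
-- outside the precondition, e.g. on minesweeper1([[0], [9, 1]]): A returns True, B returns False
import Mathlib
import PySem

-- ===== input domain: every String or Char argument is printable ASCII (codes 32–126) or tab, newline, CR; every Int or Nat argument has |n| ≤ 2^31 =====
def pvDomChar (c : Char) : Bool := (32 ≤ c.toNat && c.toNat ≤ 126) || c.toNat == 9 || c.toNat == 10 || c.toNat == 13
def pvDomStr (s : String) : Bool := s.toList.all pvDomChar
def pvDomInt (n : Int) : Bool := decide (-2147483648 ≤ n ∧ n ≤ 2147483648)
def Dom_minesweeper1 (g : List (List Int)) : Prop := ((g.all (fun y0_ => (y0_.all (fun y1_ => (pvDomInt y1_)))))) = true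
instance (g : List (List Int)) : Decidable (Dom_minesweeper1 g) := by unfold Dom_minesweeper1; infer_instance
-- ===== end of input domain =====

-- B replaces A's two-phase mine-centric pass (total, then subtract per mine) by a single
-- cell-centric pass (add each non-mine value, subtract 1 per adjacent mine); same cost.



-- ===== PORT A =====
-- g[a][b] is reached only under the guard 0 <= a < len(g) and 0 <= b < len(g[0]); on the
-- rectangular grids admitted by Pre_ the index is then in range, so pyGetD is exact there.
-- len(g[0]) is only evaluated when the mine list is nonempty, hence g is nonempty; headD [] is exact there.
def minesweeper1 (g : List (List Int)) : Bool :=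
  let s : Int := (g.flatMap (fun r => r.filter (fun x => decide (x ≠ 9)))).sum
  let mines : List (Int × Int) :=
    (PySem.List.enumerate g 0).flatMap (fun p =>
      ((PySem.List.enumerate p.2 0).filter (fun q => decide (q.2 = 9))).map (fun q => (p.1, q.1)))
  let s2 : Int := mines.foldl (fun s m =>
    (PySem.List.pyRange (m.1 - 1) (m.1 + 2) 1).foldl (fun s a =>
      (PySem.List.pyRange (m.2 - 1) (m.2 + 2) 1).foldl (fun s b =>
        if 0 ≤ a ∧ a < (g.length : Int) ∧ 0 ≤ b ∧ b < ((g.headD []).length : Int)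
            ∧ PySem.List.pyGetD (PySem.List.pyGetD g a []) b 0 ≠ 9
        then s - 1 else s) s) s) s
  decide (s2 = 0)

-- ===== PORT B =====
-- same indexing remarks as for port A: the clipped ranges keep a, b in range on rectangular grids.
def minesweeper1_alt (g : List (List Int)) : Bool :=
  let rows : Int := (g.length : Int)
  let total : Int :=
    (PySem.List.enumerate g 0).foldl (fun t p =>
      (PySem.List.enumerate p.2 0).foldl (fun t q =>
        if q.2 = 9 then t
        else
          (PySem.List.pyRange (max (p.1 - 1) 0) (min (p.1 + 2) rows) 1).foldl (fun t a =>
            (PySem.List.pyRange (max (q.1 - 1) 0) (min (q.1 + 2) ((PySem.List.pyGetD g a []).length : Int)) 1).foldl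
              (fun t b =>
                if PySem.List.pyGetD (PySem.List.pyGetD g a []) b 0 = 9 then t - 1 else t) t)
            (t + q.2)) t) 0
  decide (total = 0)

-- ===== PRECONDITION & SPEC =====
-- Pre_ excludes ragged (non-rectangular) grids that contain a mine (a 9): on those A indexes
-- every row with the single column bound len(g[0]), which raises IndexError on shorter rows and
-- silently ignores the tails of longer rows — an artefact of A's implementation that B's
-- per-row traversal does not reproduce.  Mine-free grids of any shape are admitted.
def Pre_minesweeper1 (g : List (List Int)) : Prop :=
  (∀ r ∈ g, r.length = (g.headD []).length) ∨ (∀ r ∈ g, ∀ x ∈ r, x ≠ 9)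
instance (g : List (List Int)) : Decidable (Pre_minesweeper1 g) := by
  unfold Pre_minesweeper1; infer_instance

def pvWitness_minesweeper1 : List (List Int) := [[9, 1, 0], [1, 1, 0]]

def Spec_minesweeper1 (g : List (List Int)) (out : Bool) : Prop := out = minesweeper1_alt g
instance (g : List (List Int)) (out : Bool) : Decidable (Spec_minesweeper1 g out) := by
  unfold Spec_minesweeper1; infer_instance

-- ===== CLAIM (what is proved, stated in full; the proofs are below) =====
def Claim_equal_minesweeper1 : Prop :=
  ∀ (g : List (List Int)), Dom_minesweeper1 g → Pre_minesweeper1 g →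
    Spec_minesweeper1 g (minesweeper1 g)

-- ===== LEMMAS AND PROOFS =====
-- helper shorthands used only by the proofs
-- === helper defs ===
def pvV (g : List (List Int)) (a b : Int) : Int :=
  PySem.List.pyGetD (PySem.List.pyGetD g a []) b 0
def pvN (g : List (List Int)) : Int := (g.length : Int)
def pvM (g : List (List Int)) : Int := ((g.headD []).length : Int)

-- === infrastructure ===
theorem pv_sum_map_pyRange_aux (N : Nat) : ∀ (a : Int) (f : Int → Int),
    ((PySem.List.pyRange a (a + N) 1).map f).sum = ∑ x ∈ Finset.Icc a (a + N - 1), f x := by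
  induction N with
  | zero => intro a f; rw [PySem.List.pyRange_one_eq_nil (by omega)]; simp
  | succ n ih =>
      intro a f
      rw [show ((n+1 : Nat):Int) = (n:Int) + 1 by push_cast; ring,
        show a + ((n:Int)+1) = (a + n) + 1 by ring,
        PySem.List.pyRange_one_succ_right (by omega)]
      rw [show Finset.Icc a (a + (n:Int) + 1 - 1) = insert (a + (n:Int)) (Finset.Icc a (a + n - 1)) by
        ext x; simp [Finset.mem_Icc]; omega]
      rw [Finset.sum_insert (by simp [Finset.mem_Icc])]
      simp [ih a f]
      ring

theorem pv_sum_map_pyRange (a b : Int) (f : Int → Int) :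
    ((PySem.List.pyRange a b 1).map f).sum = ∑ x ∈ Finset.Icc a (b - 1), f x := by
  by_cases h : b ≤ a
  · rw [PySem.List.pyRange_one_eq_nil h, Finset.Icc_eq_empty (by omega)]; simp
  · have := pv_sum_map_pyRange_aux (b - a).toNat a f
    rw [show a + ((b-a).toNat : Int) = b by omega] at this
    exact this

theorem pv_sum_window {n : Int} (a b : Int) (f : Int → Int)
    (h0 : ∀ x, ¬ (0 ≤ x ∧ x ≤ n - 1) → f x = 0) :
    (∑ x ∈ Finset.Icc a b, f x)
      = ∑ x ∈ Finset.Icc 0 (n - 1), if a ≤ x ∧ x ≤ b then f x else 0 := by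
  have h1 : (∑ x ∈ Finset.Icc 0 (n-1), if a ≤ x ∧ x ≤ b then f x else 0)
      = ∑ x ∈ Finset.Icc 0 (n-1), if x ∈ Finset.Icc a b then f x else 0 := by
    apply Finset.sum_congr rfl; intro x _; simp [Finset.mem_Icc]
  rw [h1, Finset.sum_ite_mem]
  refine (Finset.sum_subset Finset.inter_subset_right ?_).symm
  intro x hx hnx
  apply h0
  intro hc
  exact hnx (Finset.mem_inter.mpr ⟨Finset.mem_Icc.mpr hc, hx⟩)

theorem pv_sum_clip (a b n : Int) (f : Int → Int) :
    (∑ x ∈ Finset.Icc (max a 0) (min b (n - 1)), f x)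
      = ∑ x ∈ Finset.Icc 0 (n - 1), if a ≤ x ∧ x ≤ b then f x else 0 := by
  have h1 : Finset.Icc (max a 0) (min b (n-1)) = Finset.Icc 0 (n-1) ∩ Finset.Icc a b := by
    ext x; simp [Finset.mem_Icc]; omega
  rw [h1, ← Finset.sum_ite_mem]
  apply Finset.sum_congr rfl; intro x _; simp [Finset.mem_Icc]

theorem pv_sum4_swap (S T : Finset Int) (H : Int → Int → Int → Int → Int) :
    (∑ i ∈ S, ∑ j ∈ T, ∑ a ∈ S, ∑ b ∈ T, H i j a b)
      = ∑ i ∈ S, ∑ j ∈ T, ∑ a ∈ S, ∑ b ∈ T, H a b i j := by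
  have pack : ∀ (G : Int → Int → Int → Int → Int),
      (∑ i ∈ S, ∑ j ∈ T, ∑ a ∈ S, ∑ b ∈ T, G i j a b)
        = ∑ p ∈ S ×ˢ T, ∑ q ∈ S ×ˢ T, G p.1 p.2 q.1 q.2 := by
    intro G
    rw [← Finset.sum_product']
    apply Finset.sum_congr rfl; intro p _
    rw [← Finset.sum_product']
  rw [pack, pack]
  exact Finset.sum_comm

theorem pv_foldl_sub_one {α : Type} (p : α → Prop) [DecidablePred p] (l : List α) (s : Int) :
    l.foldl (fun s x => if p x then s - 1 else s) s
      = s - (l.map (fun x => if p x then (1 : Int) else 0)).sum := by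
  induction l generalizing s with
  | nil => simp
  | cons x t ih =>
      by_cases h : p x
      · simp [h, ih]; ring
      · simp [h, ih]

theorem pv_foldl_sub {α : Type} (f : α → Int) (l : List α) (s : Int) :
    l.foldl (fun s x => s - f x) s = s - (l.map f).sum := by
  induction l generalizing s with
  | nil => simp
  | cons x t ih => simp [ih]; ring

theorem pv_foldl_skip_add {α : Type} (p : α → Prop) [DecidablePred p] (f : α → Int)
    (l : List α) (s : Int) :
    l.foldl (fun s x => if p x then s else s + f x) s
      = s + (l.map (fun x => if p x then 0 else f x)).sum := by
  induction l generalizing s with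
  | nil => simp
  | cons x t ih =>
      by_cases h : p x
      · simp [h, ih]
      · simp [h, ih]; ring

theorem pv_sum_map_filterP {α : Type} (p : α → Prop) [DecidablePred p] (f : α → Int) (l : List α) :
    ((l.filter (fun x => decide (p x))).map f).sum
      = (l.map (fun x => if p x then f x else 0)).sum := by
  induction l with
  | nil => simp
  | cons x t ih =>
      by_cases h : p x
      · simp [h, ih]
      · simp [h, ih]

theorem pv_sum_map_flatMap {α β : Type} (l : List α) (h : α → List β) (f : β → Int) :
    (((l.flatMap h)).map f).sum = (l.map (fun x => ((h x).map f).sum)).sum := by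
  induction l with
  | nil => simp
  | cons x t ih => simp [ih]

theorem pv_sum_flatMap {α : Type} (l : List α) (h : α → List Int) :
    (l.flatMap h).sum = (l.map (fun x => (h x).sum)).sum := by
  induction l with
  | nil => simp
  | cons x t ih => simp [ih]

theorem pv_sum_over_rows_idx (g : List (List Int)) (S : Int → List Int → Int) :
    ((PySem.List.enumerate g 0).map (fun p => S p.1 p.2)).sum
      = ∑ i ∈ Finset.Icc 0 ((g.length : Int) - 1), S i (PySem.List.pyGetD g i []) := by
  rw [show (PySem.List.enumerate g 0) = PySem.List.enumerate g from rfl,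
     PySem.List.enumerate_eq_map_pyRange g [], List.map_map]
  rw [show PySem.List.len g = (g.length : Int) from by simp [PySem.List.len_eq]]
  exact pv_sum_map_pyRange 0 _ _

theorem pv_sum_over_cells_idx (r : List Int) (S : Int → Int → Int) :
    ((PySem.List.enumerate r 0).map (fun p => S p.1 p.2)).sum
      = ∑ j ∈ Finset.Icc 0 ((r.length : Int) - 1), S j (PySem.List.pyGetD r j 0) := by
  rw [show (PySem.List.enumerate r 0) = PySem.List.enumerate r from rfl,
     PySem.List.enumerate_eq_map_pyRange r 0, List.map_map]
  rw [show PySem.List.len r = (r.length : Int) from by simp [PySem.List.len_eq]]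
  exact pv_sum_map_pyRange 0 _ _

theorem pv_sum_over_rows (g : List (List Int)) (S : List Int → Int) :
    (g.map S).sum
      = ∑ i ∈ Finset.Icc 0 ((g.length : Int) - 1), S (PySem.List.pyGetD g i []) := by
  conv_lhs => rw [← PySem.List.map_pyGetD_pyRange_zero' g []]
  rw [List.map_map]
  exact pv_sum_map_pyRange 0 _ _

theorem pv_sum_over_cells (r : List Int) (S : Int → Int) :
    (r.map S).sum
      = ∑ j ∈ Finset.Icc 0 ((r.length : Int) - 1), S (PySem.List.pyGetD r j 0) := by
  conv_lhs => rw [← PySem.List.map_pyGetD_pyRange_zero' r 0]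
  rw [List.map_map]
  exact pv_sum_map_pyRange 0 _ _

theorem pv_row_len (g : List (List Int)) (hrect : ∀ r ∈ g, r.length = (g.headD []).length) (i : Int)
    (h0 : 0 ≤ i) (h1 : i ≤ (g.length : Int) - 1) :
    ((PySem.List.pyGetD g i []).length : Int) = ((g.headD []).length : Int) := by
  rw [PySem.List.pyGetD_eq_getElem g [] h0 (by omega)]
  exact_mod_cast congrArg Nat.cast (hrect _ (List.getElem_mem _))

-- nbhd lemmas
theorem pv_nbhd_A (n m : Int) (v : Int → Int → Int) (i j : Int) :
    (∑ a ∈ Finset.Icc (i-1) (i+2-1), ∑ b ∈ Finset.Icc (j-1) (j+2-1),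
      if 0 ≤ a ∧ a < n ∧ 0 ≤ b ∧ b < m ∧ v a b ≠ 9 then (1:Int) else 0)
    = ∑ a ∈ Finset.Icc 0 (n-1), ∑ b ∈ Finset.Icc 0 (m-1),
      if (i-1 ≤ a ∧ a ≤ i+1) ∧ (j-1 ≤ b ∧ b ≤ j+1) ∧ v a b ≠ 9 then 1 else 0 := by
  rw [pv_sum_window (n := n) (i-1) (i+2-1) _ (by
    intro x hx
    apply Finset.sum_eq_zero
    intro b _
    apply if_neg
    rintro ⟨h1, h2, -⟩
    exact hx ⟨h1, by omega⟩)]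
  apply Finset.sum_congr rfl
  intro a ha
  rw [Finset.mem_Icc] at ha
  by_cases hw : i - 1 ≤ a ∧ a ≤ i + 2 - 1
  · rw [if_pos hw, pv_sum_window (n := m) (j-1) (j+2-1) _ (by
      intro x hx
      apply if_neg
      rintro ⟨-, -, h3, h4, -⟩
      exact hx ⟨h3, by omega⟩)]
    apply Finset.sum_congr rfl
    intro b hb
    rw [Finset.mem_Icc] at hb
    by_cases hv : v a b = 9
    · simp [hv]
    · simp only [hv, ne_eq, not_false_iff, and_true]
      split_ifs <;> omega
  · rw [if_neg hw]
    symm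
    apply Finset.sum_eq_zero
    intro b _
    apply if_neg
    rintro ⟨h1, -, -⟩
    exact hw ⟨h1.1, by omega⟩

theorem pv_nbhd_B (n m : Int) (v : Int → Int → Int) (i j : Int) :
    (∑ a ∈ Finset.Icc (max (i-1) 0) (min (i+2) n - 1),
      ∑ b ∈ Finset.Icc (max (j-1) 0) (min (j+2) m - 1),
        if v a b = 9 then (1:Int) else 0)
    = ∑ a ∈ Finset.Icc 0 (n-1), ∑ b ∈ Finset.Icc 0 (m-1),
      if (i-1 ≤ a ∧ a ≤ i+1) ∧ (j-1 ≤ b ∧ b ≤ j+1) ∧ v a b = 9 then 1 else 0 := by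
  rw [show min (i+2) n - 1 = min (i+1) (n-1) by omega]
  rw [pv_sum_clip (i-1) (i+1) n]
  apply Finset.sum_congr rfl
  intro a ha
  by_cases hw : i - 1 ≤ a ∧ a ≤ i + 1
  · rw [if_pos hw, show min (j+2) m - 1 = min (j+1) (m-1) by omega, pv_sum_clip (j-1) (j+1) m]
    apply Finset.sum_congr rfl
    intro b hb
    split_ifs <;> tauto
  · rw [if_neg hw]
    symm
    apply Finset.sum_eq_zero
    intro b _
    apply if_neg
    rintro ⟨h1, -, -⟩
    exact hw h1

theorem pv_ite_sum2 (S T : Finset Int) (P : Prop) [Decidable P]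
    (Q : Int → Int → Prop) [∀ a b : Int, Decidable (Q a b)] :
    (if P then (∑ a ∈ S, ∑ b ∈ T, if Q a b then (1:Int) else 0) else 0)
      = ∑ a ∈ S, ∑ b ∈ T, if P ∧ Q a b then 1 else 0 := by
  by_cases h : P <;> simp [h]

theorem pv_ite_sub (P : Prop) [Decidable P] (x y : Int) :
    (if P then 0 else x - y) = (if P then 0 else x) - (if P then 0 else y) := by
  by_cases h : P <;> simp [h]

theorem pv_ite_sum2' (S T : Finset Int) (P : Prop) [Decidable P]
    (Q : Int → Int → Prop) [∀ a b : Int, Decidable (Q a b)] :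
    (if P then 0 else (∑ a ∈ S, ∑ b ∈ T, if Q a b then (1:Int) else 0))
      = ∑ a ∈ S, ∑ b ∈ T, if ¬ P ∧ Q a b then 1 else 0 := by
  by_cases h : P <;> simp [h]

-- === sum over the mine list ===
theorem pv_mines_sum (g : List (List Int)) (hrect : ∀ r ∈ g, r.length = (g.headD []).length) (F : Int × Int → Int) :
    (((PySem.List.enumerate g 0).flatMap (fun p =>
        ((PySem.List.enumerate p.2 0).filter (fun q => decide (q.2 = 9))).map
          (fun q => (p.1, q.1)))).map F).sum
      = ∑ i ∈ Finset.Icc 0 (pvN g - 1), ∑ j ∈ Finset.Icc 0 (pvM g - 1),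
          if pvV g i j = 9 then F (i, j) else 0 := by
  rw [pv_sum_map_flatMap]
  have step : ∀ p : Int × List Int,
      ((((PySem.List.enumerate p.2 0).filter (fun q => decide (q.2 = 9))).map
          (fun q => (p.1, q.1))).map F).sum
        = ((PySem.List.enumerate p.2 0).map
            (fun q => if q.2 = 9 then F (p.1, q.1) else 0)).sum := by
    intro p
    rw [List.map_map]
    exact pv_sum_map_filterP (fun q : Int × Int => q.2 = 9) _ _
  simp only [step]
  rw [pv_sum_over_rows_idx g (fun i r =>
    ((PySem.List.enumerate r 0).map (fun q : Int × Int => if q.2 = 9 then F (i, q.1) else 0)).sum)]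
  apply Finset.sum_congr rfl
  intro i hi
  rw [Finset.mem_Icc] at hi
  rw [pv_sum_over_cells_idx (PySem.List.pyGetD g i []) (fun j c => if c = 9 then F (i, j) else 0)]
  rw [pv_row_len g hrect i hi.1 hi.2]
  rfl

-- === total of non-mine cells ===
theorem pv_T_eq (g : List (List Int)) (hrect : ∀ r ∈ g, r.length = (g.headD []).length) :
    (g.flatMap (fun r => r.filter (fun x => decide (x ≠ 9)))).sum
      = ∑ i ∈ Finset.Icc 0 (pvN g - 1), ∑ j ∈ Finset.Icc 0 (pvM g - 1),
          if pvV g i j = 9 then 0 else pvV g i j := by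
  rw [pv_sum_flatMap]
  rw [pv_sum_over_rows g (fun r => (r.filter (fun x => decide (x ≠ 9))).sum)]
  apply Finset.sum_congr rfl
  intro i hi
  rw [Finset.mem_Icc] at hi
  have h1 : ((PySem.List.pyGetD g i []).filter (fun x => decide (x ≠ 9))).sum
      = (((PySem.List.pyGetD g i []).filter (fun x => decide (x ≠ 9))).map id).sum := by
    simp
  rw [h1, pv_sum_map_filterP (fun x => x ≠ 9) id]
  rw [pv_sum_over_cells (PySem.List.pyGetD g i []) (fun c => if c ≠ 9 then id c else 0)]
  rw [pv_row_len g hrect i hi.1 hi.2]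
  apply Finset.sum_congr rfl
  intro j hj
  by_cases hv : pvV g i j = 9 <;> simp [pvV]

theorem pv_A_char (g : List (List Int)) (hrect : ∀ r ∈ g, r.length = (g.headD []).length) :
    minesweeper1 g = decide (
      (∑ i ∈ Finset.Icc 0 (pvN g - 1), ∑ j ∈ Finset.Icc 0 (pvM g - 1),
          if pvV g i j = 9 then 0 else pvV g i j)
      - (∑ i ∈ Finset.Icc 0 (pvN g - 1), ∑ j ∈ Finset.Icc 0 (pvM g - 1),
          ∑ a ∈ Finset.Icc 0 (pvN g - 1), ∑ b ∈ Finset.Icc 0 (pvM g - 1),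
            if pvV g i j = 9 ∧ (i-1 ≤ a ∧ a ≤ i+1) ∧ (j-1 ≤ b ∧ b ≤ j+1) ∧ pvV g a b ≠ 9
            then 1 else 0) = 0) := by
  simp only [minesweeper1]
  simp only [pv_foldl_sub_one, pv_foldl_sub]
  rw [pv_T_eq g hrect]
  simp only [pv_sum_map_pyRange]
  rw [pv_mines_sum g hrect]
  simp only [pvV, pvN, pvM]
  simp only [pv_nbhd_A]
  simp only [pv_ite_sum2]
  rfl

theorem pv_B_char (g : List (List Int)) (hrect : ∀ r ∈ g, r.length = (g.headD []).length) :
    minesweeper1_alt g = decide (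
      (∑ i ∈ Finset.Icc 0 (pvN g - 1), ∑ j ∈ Finset.Icc 0 (pvM g - 1),
          if pvV g i j = 9 then 0 else pvV g i j)
      - (∑ i ∈ Finset.Icc 0 (pvN g - 1), ∑ j ∈ Finset.Icc 0 (pvM g - 1),
          ∑ a ∈ Finset.Icc 0 (pvN g - 1), ∑ b ∈ Finset.Icc 0 (pvM g - 1),
            if ¬ pvV g i j = 9 ∧ (i-1 ≤ a ∧ a ≤ i+1) ∧ (j-1 ≤ b ∧ b ≤ j+1) ∧ pvV g a b = 9
            then 1 else 0) = 0) := by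
  simp only [minesweeper1_alt]
  simp only [pv_foldl_sub_one, pv_foldl_sub]
  simp only [add_sub_assoc]
  simp only [pv_foldl_skip_add]
  simp only [PySem.List.foldl_add, zero_add]
  simp only [pv_sum_map_pyRange]
  rw [pv_sum_over_rows_idx g (fun i r =>
    ((PySem.List.enumerate r 0).map (fun q : Int × Int =>
      if q.2 = 9 then 0
      else q.2 - ∑ a ∈ Finset.Icc (max (i - 1) 0) (min (i + 2) (↑g.length : Int) - 1),
        ∑ b ∈ Finset.Icc (max (q.1 - 1) 0) (min (q.1 + 2) (↑(PySem.List.pyGetD g a []).length : Int) - 1),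
          if PySem.List.pyGetD (PySem.List.pyGetD g a []) b 0 = 9 then (1:Int) else 0)).sum)]
  simp only [pvN, pvM, pvV]
  have h2 : (∑ i ∈ Finset.Icc 0 ((g.length : Int) - 1),
      ((PySem.List.enumerate (PySem.List.pyGetD g i []) 0).map (fun q : Int × Int =>
        if q.2 = 9 then 0
        else q.2 - ∑ a ∈ Finset.Icc (max (i - 1) 0) (min (i + 2) (↑g.length : Int) - 1),
          ∑ b ∈ Finset.Icc (max (q.1 - 1) 0) (min (q.1 + 2) (↑(PySem.List.pyGetD g a []).length : Int) - 1),
            if PySem.List.pyGetD (PySem.List.pyGetD g a []) b 0 = 9 then (1:Int) else 0)).sum)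
      = ∑ i ∈ Finset.Icc 0 ((g.length : Int) - 1), ∑ j ∈ Finset.Icc 0 (((g.headD []).length : Int) - 1),
          (if PySem.List.pyGetD (PySem.List.pyGetD g i []) j 0 = 9 then 0
           else PySem.List.pyGetD (PySem.List.pyGetD g i []) j 0 -
             ∑ a ∈ Finset.Icc 0 ((g.length : Int) - 1), ∑ b ∈ Finset.Icc 0 (((g.headD []).length : Int) - 1),
               if (i - 1 ≤ a ∧ a ≤ i + 1) ∧ (j - 1 ≤ b ∧ b ≤ j + 1)
                   ∧ PySem.List.pyGetD (PySem.List.pyGetD g a []) b 0 = 9 then (1:Int) else 0) := by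
    apply Finset.sum_congr rfl
    intro i hi
    rw [Finset.mem_Icc] at hi
    rw [pv_sum_over_cells_idx (PySem.List.pyGetD g i []) (fun j c =>
      if c = 9 then 0
      else c - ∑ a ∈ Finset.Icc (max (i - 1) 0) (min (i + 2) (↑g.length : Int) - 1),
        ∑ b ∈ Finset.Icc (max (j - 1) 0) (min (j + 2) (↑(PySem.List.pyGetD g a []).length : Int) - 1),
          if PySem.List.pyGetD (PySem.List.pyGetD g a []) b 0 = 9 then (1:Int) else 0)]
    rw [pv_row_len g hrect i hi.1 hi.2]
    apply Finset.sum_congr rfl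
    intro j hj
    have hlen : (∑ a ∈ Finset.Icc (max (i - 1) 0) (min (i + 2) (↑g.length : Int) - 1),
        ∑ b ∈ Finset.Icc (max (j - 1) 0) (min (j + 2) (↑(PySem.List.pyGetD g a []).length : Int) - 1),
          if PySem.List.pyGetD (PySem.List.pyGetD g a []) b 0 = 9 then (1:Int) else 0)
        = ∑ a ∈ Finset.Icc (max (i - 1) 0) (min (i + 2) (↑g.length : Int) - 1),
        ∑ b ∈ Finset.Icc (max (j - 1) 0) (min (j + 2) (↑(g.headD []).length : Int) - 1),
          if PySem.List.pyGetD (PySem.List.pyGetD g a []) b 0 = 9 then (1:Int) else 0 := by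
      apply Finset.sum_congr rfl
      intro a ha
      rw [Finset.mem_Icc] at ha
      have hmin := min_le_right (i + 2) ((g.length : Int))
      have hmax := le_max_right (i - 1) (0:Int)
      rw [pv_row_len g hrect a (by omega) (by omega)]
    rw [hlen, pv_nbhd_B ((g.length : Int)) (((g.headD []).length : Int))
      (fun a b => PySem.List.pyGetD (PySem.List.pyGetD g a []) b 0) i j]
  rw [h2]
  simp only [pv_ite_sub]
  simp only [Finset.sum_sub_distrib]
  simp only [pv_ite_sum2']
  rfl

theorem pv_val_ne_nine (g : List (List Int)) (h9 : ∀ r ∈ g, ∀ x ∈ r, x ≠ 9) (a b : Int)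
    (ha0 : 0 ≤ a) (han : a < (g.length : Int)) (hb0 : 0 ≤ b)
    (hbm : b < ((PySem.List.pyGetD g a []).length : Int)) :
    PySem.List.pyGetD (PySem.List.pyGetD g a []) b 0 ≠ 9 := by
  rw [PySem.List.pyGetD_eq_getElem g [] ha0 han] at hbm ⊢
  rw [PySem.List.pyGetD_eq_getElem _ 0 hb0 hbm]
  exact h9 _ (List.getElem_mem _) _ (List.getElem_mem _)

theorem pv_sum_enum_snd (l : List (List Int)) : ∀ s : Int,
    (List.map (fun p : Int × List Int => p.2.sum) (PySem.List.enumerate l s)).sum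
      = (List.map (fun r : List Int => r.sum) l).sum := by
  induction l with
  | nil => intro s; simp [PySem.List.enumerate_nil]
  | cons x t ih => intro s; simp [PySem.List.enumerate_cons, ih]

theorem pv_key_nonine (g : List (List Int)) (h9 : ∀ r ∈ g, ∀ x ∈ r, x ≠ 9) :
    minesweeper1 g = minesweeper1_alt g := by
  simp only [minesweeper1, minesweeper1_alt]
  simp only [pv_foldl_sub_one, pv_foldl_sub, add_sub_assoc, pv_foldl_skip_add,
    PySem.List.foldl_add, zero_add]
  simp only [pv_sum_map_pyRange]
  have hmines : (List.flatMap (fun p : Int × List Int =>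
      List.map (fun q : Int × Int => (p.1, q.1))
        (List.filter (fun q : Int × Int => decide (q.2 = 9)) (PySem.List.enumerate p.2)))
      (PySem.List.enumerate g)) = ([] : List (Int × Int)) := by
    rw [List.flatMap_eq_nil_iff]
    intro p hp
    rw [List.map_eq_nil_iff, List.filter_eq_nil_iff]
    intro q hq
    simp only [decide_eq_true_eq]
    obtain ⟨k, hk, rfl⟩ := (PySem.List.mem_enumerate_iff _ _ _).mp hp
    obtain ⟨k2, hk2, rfl⟩ := (PySem.List.mem_enumerate_iff _ _ _).mp hq
    exact h9 _ (List.getElem_mem _) _ (List.getElem_mem _)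
  rw [hmines]
  simp only [List.map_nil, List.sum_nil, sub_zero]
  rw [pv_sum_flatMap]
  have hA : List.map (fun r => (List.filter (fun x => decide (x ≠ 9)) r).sum) g
      = List.map (fun r : List Int => r.sum) g := by
    apply List.map_congr_left
    intro r hr
    rw [List.filter_eq_self.mpr]
    intro x hx
    simpa using h9 r hr x hx
  rw [hA]
  have hB : List.map (fun p : Int × List Int =>
      (List.map (fun q : Int × Int =>
        if q.2 = 9 then 0
        else q.2 - ∑ a ∈ Finset.Icc (max (p.1 - 1) 0) (min (p.1 + 2) (↑g.length : Int) - 1),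
          ∑ b ∈ Finset.Icc (max (q.1 - 1) 0) (min (q.1 + 2) (↑(PySem.List.pyGetD g a []).length : Int) - 1),
            if PySem.List.pyGetD (PySem.List.pyGetD g a []) b 0 = 9 then (1:Int) else 0)
        (PySem.List.enumerate p.2)).sum) (PySem.List.enumerate g)
      = List.map (fun p : Int × List Int => p.2.sum) (PySem.List.enumerate g) := by
    apply List.map_congr_left
    intro p hp
    have hp2 : p.2 ∈ g := by
      obtain ⟨k, hk, rfl⟩ := (PySem.List.mem_enumerate_iff _ _ _).mp hp
      exact List.getElem_mem _
    have hcell : ∀ q ∈ PySem.List.enumerate p.2,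
        (if q.2 = 9 then (0:Int)
         else q.2 - ∑ a ∈ Finset.Icc (max (p.1 - 1) 0) (min (p.1 + 2) (↑g.length : Int) - 1),
          ∑ b ∈ Finset.Icc (max (q.1 - 1) 0) (min (q.1 + 2) (↑(PySem.List.pyGetD g a []).length : Int) - 1),
            if PySem.List.pyGetD (PySem.List.pyGetD g a []) b 0 = 9 then (1:Int) else 0) = q.2 := by
      intro q hq
      have hq2 : q.2 ∈ p.2 := by
        obtain ⟨k, hk, rfl⟩ := (PySem.List.mem_enumerate_iff _ _ _).mp hq
        exact List.getElem_mem _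
      rw [if_neg (h9 _ hp2 _ hq2)]
      have hz : (∑ a ∈ Finset.Icc (max (p.1 - 1) 0) (min (p.1 + 2) (↑g.length : Int) - 1),
          ∑ b ∈ Finset.Icc (max (q.1 - 1) 0) (min (q.1 + 2) (↑(PySem.List.pyGetD g a []).length : Int) - 1),
            if PySem.List.pyGetD (PySem.List.pyGetD g a []) b 0 = 9 then (1:Int) else 0) = 0 := by
        apply Finset.sum_eq_zero
        intro a ha
        rw [Finset.mem_Icc] at ha
        have h1 := le_max_right (p.1 - 1) (0:Int)
        have h2 := min_le_right (p.1 + 2) ((g.length : Int))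
        apply Finset.sum_eq_zero
        intro b hb
        rw [Finset.mem_Icc] at hb
        have h3 := le_max_right (q.1 - 1) (0:Int)
        have h4 := min_le_right (q.1 + 2) ((↑(PySem.List.pyGetD g a []).length : Int))
        rw [if_neg (pv_val_ne_nine g h9 a b (by omega) (by omega) (by omega) (by omega))]
      rw [hz, sub_zero]
    rw [List.map_congr_left hcell, PySem.List.map_snd_enumerate]
  rw [hB, pv_sum_enum_snd g 0]

theorem pv_key (g : List (List Int)) (hpre : Pre_minesweeper1 g) :
    minesweeper1 g = minesweeper1_alt g := by
  rcases hpre with hrect | h9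
  case inr => exact pv_key_nonine g h9
  rw [pv_A_char g hrect, pv_B_char g hrect]
  have hsw : (∑ i ∈ Finset.Icc 0 (pvN g - 1), ∑ j ∈ Finset.Icc 0 (pvM g - 1),
        ∑ a ∈ Finset.Icc 0 (pvN g - 1), ∑ b ∈ Finset.Icc 0 (pvM g - 1),
          if pvV g i j = 9 ∧ (i-1 ≤ a ∧ a ≤ i+1) ∧ (j-1 ≤ b ∧ b ≤ j+1) ∧ pvV g a b ≠ 9
          then (1:Int) else 0)
      = ∑ i ∈ Finset.Icc 0 (pvN g - 1), ∑ j ∈ Finset.Icc 0 (pvM g - 1),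
        ∑ a ∈ Finset.Icc 0 (pvN g - 1), ∑ b ∈ Finset.Icc 0 (pvM g - 1),
          if ¬ pvV g i j = 9 ∧ (i-1 ≤ a ∧ a ≤ i+1) ∧ (j-1 ≤ b ∧ b ≤ j+1) ∧ pvV g a b = 9
          then (1:Int) else 0 := by
    refine Eq.trans (pv_sum4_swap _ _ _) ?_
    apply Finset.sum_congr rfl; intro i _
    apply Finset.sum_congr rfl; intro j _
    apply Finset.sum_congr rfl; intro a _
    apply Finset.sum_congr rfl; intro b _
    apply if_congr _ rfl rfl
    constructor
    · rintro ⟨h1, h2, h3, h4⟩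
      exact ⟨h4, ⟨by omega, by omega⟩, ⟨by omega, by omega⟩, h1⟩
    · rintro ⟨h1, h2, h3, h4⟩
      exact ⟨h4, ⟨by omega, by omega⟩, ⟨by omega, by omega⟩, h1⟩
  rw [hsw]


-- ===== VERDICT (by name: the statement is the Claim_ definition above) =====
theorem minesweeper1_spec : Claim_equal_minesweeper1 := by
  intro g _ hpre
  show minesweeper1 g = minesweeper1_alt g
  exact pv_key g hpre
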